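-- pv_equiv track=rewrite | github.com/thanya-aura/thanyaaura-gateway | app/individual.py | _pick_highest
-- ===== SOURCE A (Python) =====
-- from typing import Optional, Dict, Any, Iterable
--
-- RANK = {"Standard": 10, "Plus": 20, "Premium": 30}
--
-- def _pick_highest(plans: Iterable[str]) -> Optional[str]:
--     best = None
--     best_rank = -1
--     for p in plans:
--         r = RANK.get(p, -1)
--         if r > best_rank:
--             best, best_rank = p, r
--     return best
-- ===== SOURCE B (Python) =====
-- from typing import Optional, Iterable
--
-- RANK = {"Standard": 10, "Plus": 20, "Premium": 30}
--
-- def _pick_highest(plans: Iterable[str]) -> Optional[str]: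
--     available = set(plans)
--     for name in sorted(RANK, key=RANK.get, reverse=True):
--         if name in available:
--             return name
--     return None
-- ===== Notes on version B (the rewrite author's own statement) =====
-- stated objective: idiomatic
-- what changed: Instead of scanning the input while tracking a running best rank, B builds a set of the input plans and walks the RANK table's keys in descending rank order, returning the first key present; unknown plans never win in either version.
import Mathlib
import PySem

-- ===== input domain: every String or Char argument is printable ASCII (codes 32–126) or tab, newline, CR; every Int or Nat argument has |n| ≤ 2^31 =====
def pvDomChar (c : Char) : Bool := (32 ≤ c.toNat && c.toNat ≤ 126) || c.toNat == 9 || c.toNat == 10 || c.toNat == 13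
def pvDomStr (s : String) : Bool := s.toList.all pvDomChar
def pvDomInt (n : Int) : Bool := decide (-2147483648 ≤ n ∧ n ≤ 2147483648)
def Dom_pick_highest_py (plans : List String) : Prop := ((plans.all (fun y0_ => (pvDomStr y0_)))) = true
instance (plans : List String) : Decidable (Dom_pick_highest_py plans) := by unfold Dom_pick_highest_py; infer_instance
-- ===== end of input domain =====

-- B replaces A's running-maximum scan of the input by a set of the input plans
-- plus a walk over the RANK table's keys sorted by rank descending, returning the first present key.


-- ===== PORT A =====
def RANK : PySem.Dict String Int :=
  PySem.Dict.ofList [("Standard", 10), ("Plus", 20), ("Premium", 30)]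

def pick_highest_py (plans : List String) : Option String :=
  (plans.foldl
    (fun st p =>
      let r := RANK.getD p (-1)
      if r > st.2 then (some p, r) else st)
    ((none : Option String), (-1 : Int))).1

-- ===== PORT B =====
-- the 'for name in …: if name in available: return name' loop of Source B
def pickLoop (available : PySem.Set String) : List String → Option String
  | [] => none
  | n :: rest => if PySem.Set.contains available n then some n else pickLoop available rest

def pick_highest_py_alt (plans : List String) : Option String :=
  let available := PySem.Set.ofList plans
  pickLoop available (PySem.List.sorted RANK.keys (fun k => RANK.getD k (-1)) true)

-- ===== PRECONDITION & SPEC =====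
def Spec_pick_highest_py (plans : List String) (out : Option String) : Prop := out = pick_highest_py_alt plans
instance (plans : List String) (out : Option String) : Decidable (Spec_pick_highest_py plans out) := by unfold Spec_pick_highest_py; infer_instance

-- ===== CLAIM (what is proved, stated in full; the proofs are below) =====
def Claim_equal_pick_highest_py : Prop := ∀ (plans : List String), Dom_pick_highest_py plans → Spec_pick_highest_py plans (pick_highest_py plans)

-- ===== LEMMAS AND PROOFS =====

-- the table lookup of port A, written out
theorem rank_getD (p : String) :
    RANK.getD p (-1) =
      if p = "Standard" then 10 else if p = "Plus" then 20
      else if p = "Premium" then 30 else -1 := by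
  split_ifs with h1 h2 h3 <;> try (subst_vars; decide)
  have e1 : ("Standard" == p) = false := by simp [Ne.symm h1]
  have e2 : ("Plus" == p) = false := by simp [Ne.symm h2]
  have e3 : ("Premium" == p) = false := by simp [Ne.symm h3]
  simp [RANK, PySem.Dict.ofList, PySem.Dict.getD, PySem.Dict.get?, PySem.Dict.update,
    PySem.Dict.insert, PySem.Dict.empty, List.find?, e1, e2, e3]

-- characterization of A's fold from any state with best_rank ≥ -1 (A starts at -1)
theorem foldA_char (l : List String) (b : Option String) (br : Int) (hbr : -1 ≤ br) :
    (l.foldl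
      (fun st p =>
        let r := RANK.getD p (-1)
        if r > st.2 then (some p, r) else st)
      (b, br)) =
      if "Premium" ∈ l ∧ br < 30 then (some "Premium", 30)
      else if "Plus" ∈ l ∧ br < 20 then (some "Plus", 20)
      else if "Standard" ∈ l ∧ br < 10 then (some "Standard", 10)
      else (b, br) := by
  induction l generalizing b br with
  | nil => simp
  | cons p t ih =>
    simp only [List.foldl_cons, List.mem_cons]
    rw [rank_getD]
    by_cases hS : p = "Standard"
    · subst hS
      by_cases h : (10 : Int) > br <;>
        simp only [h, reduceIte, gt_iff_lt] <;> rw [ih _ _ (by omega)] <;>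
        split_ifs <;> simp_all <;> omega
    · by_cases hP : p = "Plus"
      · subst hP
        by_cases h : (20 : Int) > br <;>
          simp only [hS, h, reduceIte, gt_iff_lt] <;> rw [ih _ _ (by omega)] <;>
          (clear ih; split_ifs <;> simp_all <;> omega)
      · by_cases hM : p = "Premium"
        · subst hM
          by_cases h : (30 : Int) > br <;>
            simp only [hS, hP, h, reduceIte, gt_iff_lt] <;> rw [ih _ _ (by omega)] <;>
            (clear ih; split_ifs <;> simp_all)
        · have hS' : ¬("Standard" : String) = p := fun h => hS h.symm
          have hP' : ¬("Plus" : String) = p := fun h => hP h.symm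
          have hM' : ¬("Premium" : String) = p := fun h => hM h.symm
          by_cases h : (-1 : Int) > br <;>
            simp only [hS, hP, hM, h, reduceIte, gt_iff_lt] <;> rw [ih _ _ (by omega)] <;>
            (clear ih; split_ifs <;> simp_all <;> omega)

-- the sorted key walk of port B is the fixed descending-rank list
theorem sorted_keys :
    PySem.List.sorted RANK.keys (fun k => RANK.getD k (-1)) true
      = ["Premium", "Plus", "Standard"] := by decide

-- ===== VERDICT (by name: the statement is the Claim_ definition above) =====
theorem pick_highest_py_spec : Claim_equal_pick_highest_py := by
  intro plans _
  unfold Spec_pick_highest_py pick_highest_py pick_highest_py_alt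
  rw [foldA_char _ _ _ (by omega), sorted_keys]
  by_cases h1 : "Premium" ∈ plans <;> by_cases h2 : "Plus" ∈ plans <;>
    by_cases h3 : "Standard" ∈ plans <;>
    simp [pickLoop, h1, h2, h3, PySem.Set.mem_ofList]
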